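-- pv_equiv track=rewrite | github.com/emerginganalytics/cyberarena | labs/cryptoserver/ArenaCiphers.py | get_keyword_sequence
-- ===== SOURCE A (Python) =====
-- def get_keyword_sequence(keyword):
--     sequence = []
--
--     for pos, ch in enumerate(keyword):
--         prevLetters = keyword[:pos]
--         newNumber = 1
--         for prevPos, prevCh in enumerate(prevLetters):
--             if prevCh > ch:
--                 sequence[prevPos] += 1
--             else:
--                 newNumber += 1
--         sequence.append(newNumber)
--     return sequence
-- ===== SOURCE B (Python) =====
-- def get_keyword_sequence(keyword):
--     # rank of each position = 1 + number of positions that sort strictly before it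
--     # under the stable order (character, position); no incremental updates needed.
--     return [1 + sum(1 for j, c in enumerate(keyword)
--                     if c < ch or (c == ch and j < i))
--             for i, ch in enumerate(keyword)]
-- ===== Notes on version B (the rewrite author's own statement) =====
-- stated objective: simpler
-- what changed: Replaces A's incremental scheme (append a rank and retroactively bump all earlier ranks via index mutation) with a direct closed-form rank: each position's value is 1 + the number of positions strictly smaller under the stable (char, index) order, computed in one mutation-free comprehension.
import Mathlib
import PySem

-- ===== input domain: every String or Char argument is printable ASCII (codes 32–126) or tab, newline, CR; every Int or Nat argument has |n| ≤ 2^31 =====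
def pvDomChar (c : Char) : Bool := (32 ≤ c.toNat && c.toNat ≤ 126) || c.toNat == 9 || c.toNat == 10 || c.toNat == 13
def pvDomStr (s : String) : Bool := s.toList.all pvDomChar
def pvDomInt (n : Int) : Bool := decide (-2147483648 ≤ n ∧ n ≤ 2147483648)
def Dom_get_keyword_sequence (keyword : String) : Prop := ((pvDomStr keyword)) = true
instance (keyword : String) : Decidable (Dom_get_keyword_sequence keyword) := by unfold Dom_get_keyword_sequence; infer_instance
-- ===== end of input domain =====

-- B replaces A's incremental rank updates (append + retroactive bumps of earlier entries) with a
-- direct mutation-free rank formula; objective: simpler. Equivalence proved on all inputs.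

-- ===== PORT A =====
-- inner loop body: 'if prevCh > ch: sequence[prevPos] += 1  else: newNumber += 1'
-- (prevPos is always a valid index 0 ≤ prevPos < len(sequence) in Python, so List.modify at
-- prevPos.toNat is exact)
def gksInner (ch : Char) (st : List Int × Int) (p : Int × Char) : List Int × Int :=
  if p.2 > ch then (st.1.modify p.1.toNat (· + 1), st.2) else (st.1, st.2 + 1)

-- outer loop body: prevLetters = keyword[:pos] (pos ≥ 0, so the slice is List.take), run the
-- inner loop over enumerate(prevLetters) with newNumber = 1, then append newNumber
def gksOuter (cs : List Char) (sequence : List Int) (pc : Int × Char) : List Int :=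
  let prevLetters := cs.take pc.1.toNat
  let r := (PySem.List.enumerate prevLetters).foldl (gksInner pc.2) (sequence, 1)
  r.1 ++ [r.2]

def get_keyword_sequence (keyword : String) : List Int :=
  (PySem.List.enumerate keyword.toList).foldl (gksOuter keyword.toList) []

-- ===== PORT B =====
-- '1 + sum(1 for j, c in enumerate(keyword) if c < ch or (c == ch and j < i))'
def gksRank (cs : List Char) (ic : Int × Char) : Int :=
  1 + ((PySem.List.enumerate cs).countP
        (fun jc => decide (jc.2 < ic.2 ∨ (jc.2 = ic.2 ∧ jc.1 < ic.1))) : Int)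

def get_keyword_sequence_alt (keyword : String) : List Int :=
  (PySem.List.enumerate keyword.toList).map (gksRank keyword.toList)

-- ===== PRECONDITION & SPEC =====
def Spec_get_keyword_sequence (keyword : String) (out : List Int) : Prop := out = get_keyword_sequence_alt keyword
instance (keyword : String) (out : List Int) : Decidable (Spec_get_keyword_sequence keyword out) := by unfold Spec_get_keyword_sequence; infer_instance

-- ===== CLAIM (what is proved, stated in full; the proofs are below) =====
def Claim_equal_get_keyword_sequence : Prop := ∀ (keyword : String), Dom_get_keyword_sequence keyword → Spec_get_keyword_sequence keyword (get_keyword_sequence keyword)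

-- ===== LEMMAS AND PROOFS =====

-- reference form: rank of position i after the first p positions have been processed
def gksLt (cs : List Char) (i j : Nat) : Bool :=
  decide (cs.getD j 'a' < cs.getD i 'a') ||
    (cs.getD j 'a' == cs.getD i 'a' && decide (j < i))

def gksVal (cs : List Char) (p i : Nat) : Int := 1 + ((List.range p).countP (gksLt cs i) : Int)

def gksS (cs : List Char) (p : Nat) : List Int := (List.range p).map (gksVal cs p)

lemma enum_eq_range {α : Type} (d : α) (xs : List α) (s : Int) :
    PySem.List.enumerate xs s
      = (List.range xs.length).map (fun (k : Nat) => ((s + k : Int), xs.getD k d)) := by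
  induction xs generalizing s with
  | nil => simp [PySem.List.enumerate_nil]
  | cons x t ih =>
    rw [PySem.List.enumerate_cons, ih (s + 1)]
    simp only [List.length_cons, List.range_succ_eq_map, List.map_cons, List.map_map]
    refine congrArg₂ _ (by simp) ?_
    refine List.map_congr_left (fun k _ => ?_)
    simp only [Function.comp_apply, List.getD_cons_succ]
    refine congrArg₂ _ (by push_cast; ring) rfl

lemma getD_app_lt {α : Type} (ys : List α) (y d : α) (i : Nat) (h : i < ys.length) :
    (ys ++ [y]).getD i d = ys.getD i d := by
  simp [List.getD, List.getElem?_append_left h]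

lemma getD_app_self {α : Type} (ys : List α) (y d : α) :
    (ys ++ [y]).getD ys.length d = y := by
  simp [List.getD]

lemma getD_take (cs : List Char) (p i : Nat) (d : Char) (h : i < p) :
    (cs.take p).getD i d = cs.getD i d := by
  simp [List.getD, List.getElem?_take, h]

lemma modify_map_range (L m : Nat) (hm : m < L) (f : Nat → Int) :
    ((List.range L).map f).modify m (· + 1)
      = (List.range L).map (fun i => if i = m then f i + 1 else f i) := by
  apply List.ext_getElem
  · simp
  · intro i h1 h2
    simp only [List.length_modify, List.length_map, List.length_range] at h1
    rw [List.getElem_modify]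
    by_cases h : m = i
    · simp [h]
    · simp [h]
      omega

lemma char_nle (a b : Char) : (!decide (b < a)) = (decide (a < b) || a == b) := by
  rcases lt_trichotomy a b with h | h | h
  · simp [h, not_lt_of_gt h]
  · simp [h]
  · simp [h, not_lt_of_gt h, ne_of_gt h, asymm h]

lemma inner_fold (ch : Char) (xs : List Char) (L : Nat) (h : xs.length ≤ L)
    (f : Nat → Int) (k : Int) :
    (PySem.List.enumerate xs).foldl (gksInner ch) ((List.range L).map f, k)
      = ((List.range L).map
          (fun i => if i < xs.length ∧ ch < xs.getD i 'a' then f i + 1 else f i),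
         k + ((List.range xs.length).countP
                (fun j => !decide (ch < xs.getD j 'a')) : Int)) := by
  induction xs using List.reverseRecOn with
  | nil => simp
  | append_singleton ys y ih =>
    have hy : ys.length ≤ L := by simp at h; omega
    have hyL : ys.length < L := by simp at h; omega
    rw [PySem.List.enumerate_append, List.foldl_append, ih hy]
    have hsing : PySem.List.enumerate [y] ((0 : Int) + ys.length) = [((ys.length : Int), y)] := by
      simp [PySem.List.enumerate_cons, PySem.List.enumerate_nil]
    rw [hsing]
    simp only [List.foldl_cons, List.foldl_nil, gksInner]
    by_cases hgt : ch < y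
    · rw [if_pos hgt]
      refine congrArg₂ _ ?_ ?_
      · simp only [Int.toNat_natCast]
        rw [modify_map_range L ys.length hyL]
        refine List.map_congr_left (fun i hi => ?_)
        simp only [List.mem_range] at hi
        by_cases he : i = ys.length
        · subst he
          simp [getD_app_self, hgt]
        · have hlt : i < ys.length + 1 ∧ ch < (ys ++ [y]).getD i 'a' ↔
              i < ys.length ∧ ch < ys.getD i 'a' := by
            constructor
            · rintro ⟨h1, h2⟩
              have : i < ys.length := by omega
              exact ⟨this, by rwa [getD_app_lt _ _ _ _ this] at h2⟩
            · rintro ⟨h1, h2⟩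
              exact ⟨by omega, by rwa [getD_app_lt _ _ _ _ h1]⟩
          simp only [he, if_false, List.length_append, List.length_cons, List.length_nil]
          rw [if_congr hlt rfl rfl]
      · simp only [List.length_append, List.length_cons, List.length_nil, Nat.add_zero]
        rw [List.range_succ, List.countP_append]
        have hc : (List.range ys.length).countP
              (fun j => !decide (ch < (ys ++ [y]).getD j 'a'))
            = (List.range ys.length).countP (fun j => !decide (ch < ys.getD j 'a')) := by
          refine List.countP_congr (fun j hj => ?_)
          simp only [List.mem_range] at hj
          rw [getD_app_lt _ _ _ _ hj]
        rw [hc]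
        simp [getD_app_self, hgt]
    · rw [if_neg hgt]
      refine congrArg₂ _ ?_ ?_
      · refine List.map_congr_left (fun i hi => ?_)
        by_cases he : i = ys.length
        · subst he
          simp [getD_app_self, hgt]
        · have hlt : i < ys.length + 1 ∧ ch < (ys ++ [y]).getD i 'a' ↔
              i < ys.length ∧ ch < ys.getD i 'a' := by
            constructor
            · rintro ⟨h1, h2⟩
              have : i < ys.length := by omega
              exact ⟨this, by rwa [getD_app_lt _ _ _ _ this] at h2⟩
            · rintro ⟨h1, h2⟩
              exact ⟨by omega, by rwa [getD_app_lt _ _ _ _ h1]⟩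
          simp only [List.length_append, List.length_cons, List.length_nil, Nat.add_zero]
          rw [if_congr hlt rfl rfl]
      · simp only [List.length_append, List.length_cons, List.length_nil, Nat.add_zero]
        rw [List.range_succ, List.countP_append]
        have hc : (List.range ys.length).countP
              (fun j => !decide (ch < (ys ++ [y]).getD j 'a'))
            = (List.range ys.length).countP (fun j => !decide (ch < ys.getD j 'a')) := by
          refine List.countP_congr (fun j hj => ?_)
          simp only [List.mem_range] at hj
          rw [getD_app_lt _ _ _ _ hj]
        rw [hc]
        simp [getD_app_self, hgt]
        push_cast
        ring

lemma outer_step (cs : List Char) (p : Nat) (hp : p < cs.length) :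
    gksOuter cs (gksS cs p) (((p : Nat) : Int), cs.getD p 'a') = gksS cs (p + 1) := by
  have htk : (cs.take p).length = p := by simp; omega
  unfold gksOuter gksS
  simp only [Int.toNat_natCast]
  rw [inner_fold (cs.getD p 'a') (cs.take p) p (by omega) (gksVal cs p) 1]
  dsimp only
  rw [htk, List.range_succ, List.map_append]
  refine congrArg₂ _ ?_ ?_
  · refine List.map_congr_left (fun i hi => ?_)
    simp only [List.mem_range] at hi
    have hval : gksVal cs (p + 1) i
        = gksVal cs p i + if cs.getD p 'a' < cs.getD i 'a' then 1 else 0 := by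
      unfold gksVal
      rw [List.range_succ, List.countP_append]
      have hgl : (gksLt cs i) p = decide (cs.getD p 'a' < cs.getD i 'a') := by
        unfold gksLt
        have : ¬ (p < i) := by omega
        simp [this]
      by_cases hc : cs.getD p 'a' < cs.getD i 'a'
      · simp [hgl, hc]
        push_cast
        ring
      · simp [hgl, hc]
        ring
    rw [hval]
    by_cases hc : cs.getD p 'a' < cs.getD i 'a'
    · rw [if_pos ⟨hi, by rwa [getD_take _ _ _ _ hi]⟩, if_pos hc]
    · rw [if_neg, if_neg hc]
      · ring
      · rintro ⟨_, h2⟩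
        rw [getD_take _ _ _ _ hi] at h2
        exact hc h2
  · have hval : gksVal cs (p + 1) p
        = 1 + ((List.range p).countP (gksLt cs p) : Int) := by
      unfold gksVal
      rw [List.range_succ, List.countP_append]
      have hgl : (gksLt cs p) p = false := by
        unfold gksLt
        simp
      simp [hgl]
    have hc : (List.range p).countP (fun j => !decide (cs.getD p 'a' < (cs.take p).getD j 'a'))
        = (List.range p).countP (gksLt cs p) := by
      refine List.countP_congr (fun j hj => ?_)
      simp only [List.mem_range] at hj
      rw [getD_take _ _ _ _ hj]
      unfold gksLt
      rw [char_nle]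
      simp [hj]
    rw [hc, List.map_cons, List.map_nil, hval]

lemma outer_fold (cs : List Char) (q : Nat) : ∀ p, p + q = cs.length →
    ((PySem.List.enumerate cs).drop p).foldl (gksOuter cs) (gksS cs p)
      = gksS cs cs.length := by
  induction q with
  | zero =>
    intro p h
    have : ((PySem.List.enumerate cs).drop p) = [] := by
      apply List.drop_eq_nil_of_le
      simp [PySem.List.length_enumerate]
      omega
    rw [this]
    simp [h.symm]
  | succ q ih =>
    intro p h
    have hp : p < cs.length := by omega
    have hlen : p < (PySem.List.enumerate cs).length := by
      simp [PySem.List.length_enumerate]; omega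
    rw [List.drop_eq_getElem_cons hlen, List.foldl_cons]
    have hget : (PySem.List.enumerate cs)[p] = (((p : Nat) : Int), cs.getD p 'a') := by
      rw [PySem.List.getElem_enumerate]
      simp [List.getD, List.getElem?_eq_getElem hp]
    rw [hget, outer_step cs p hp]
    exact ih (p + 1) (by omega)

lemma A_eq (keyword : String) :
    get_keyword_sequence keyword = gksS keyword.toList keyword.toList.length := by
  have h := outer_fold keyword.toList keyword.toList.length 0 (by omega)
  simpa [get_keyword_sequence, gksS] using h

lemma B_eq (keyword : String) :
    get_keyword_sequence_alt keyword = gksS keyword.toList keyword.toList.length := by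
  unfold get_keyword_sequence_alt gksS
  rw [enum_eq_range 'a' keyword.toList 0, List.map_map]
  refine List.map_congr_left (fun i hi => ?_)
  simp only [List.mem_range] at hi
  simp only [Function.comp_apply, gksRank, gksVal]
  refine congrArg₂ _ rfl ?_
  refine congrArg _ ?_
  rw [enum_eq_range 'a' keyword.toList 0, List.countP_map]
  refine List.countP_congr (fun j hj => ?_)
  simp only [List.mem_range] at hj
  unfold gksLt
  simp only [Function.comp_apply, zero_add]
  by_cases h1 : keyword.toList.getD j 'a' < keyword.toList.getD i 'a' <;>
    by_cases h2 : keyword.toList.getD j 'a' = keyword.toList.getD i 'a' <;>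
      simp [h1, h2, Int.ofNat_lt]

-- ===== VERDICT (by name: the statement is the Claim_ definition above) =====
theorem get_keyword_sequence_spec : Claim_equal_get_keyword_sequence := by
  intro keyword _
  unfold Spec_get_keyword_sequence
  rw [A_eq, B_eq]
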